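-- pv_equiv track=rewrite | github.com/rmibogi/labs | lab_13/lab_13.py | count_gender_and_survival
-- ===== SOURCE A (Python) =====
-- def count_gender_and_survival(data, header):
--     gender_index = header.index('Sex')
--     survived_index = header.index('Survived')
--
--     male_count = 0
--     female_count = 0
--     male_survived = 0
--     female_survived = 0
--
--     for row in data:
--         if row[gender_index].lower() == 'male':
--             male_count += 1
--             if row[survived_index] == '1':
--                 male_survived += 1
--         elif row[gender_index].lower() == 'female':
--             female_count += 1
--             if row[survived_index] == '1':
--                 female_survived += 1
--
--     return male_count, female_count, male_survived, female_survived
-- ===== SOURCE B (Python) =====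
-- def count_gender_and_survival(data, header):
--     gender_index = header.index('Sex')
--     survived_index = header.index('Survived')
--     male_count = sum(1 for row in data if row[gender_index].lower() == 'male')
--     female_count = sum(1 for row in data if row[gender_index].lower() == 'female')
--     male_survived = sum(1 for row in data
--                         if row[gender_index].lower() == 'male' and row[survived_index] == '1')
--     female_survived = sum(1 for row in data
--                           if row[gender_index].lower() == 'female' and row[survived_index] == '1')
--     return male_count, female_count, male_survived, female_survived
-- ===== Notes on version B (the rewrite author's own statement) =====
-- stated objective: alternative
-- what changed: Replaces the single interleaved loop maintaining four counters with four independent filtering passes, each total computed as a sum over a generator expression.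
import Mathlib
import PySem

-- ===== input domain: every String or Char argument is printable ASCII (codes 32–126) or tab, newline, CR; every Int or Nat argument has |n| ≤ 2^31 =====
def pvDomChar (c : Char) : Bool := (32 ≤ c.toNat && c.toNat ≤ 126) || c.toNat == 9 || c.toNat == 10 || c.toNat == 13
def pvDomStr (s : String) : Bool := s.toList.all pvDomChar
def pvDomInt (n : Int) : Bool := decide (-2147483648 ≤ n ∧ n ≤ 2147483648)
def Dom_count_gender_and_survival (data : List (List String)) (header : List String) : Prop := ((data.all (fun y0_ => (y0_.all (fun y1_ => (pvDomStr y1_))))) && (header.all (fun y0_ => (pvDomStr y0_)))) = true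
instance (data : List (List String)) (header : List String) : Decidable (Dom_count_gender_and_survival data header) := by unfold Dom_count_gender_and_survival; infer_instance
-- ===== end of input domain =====

-- B replaces A's single interleaved loop with four counters by four independent filtering passes (one count per returned total); alternative decomposition, same cost class.

-- ===== PORT A =====
-- one loop step of A: classify the row and bump the matching counters
def cgsStep (gi si : Nat) (st : Int × Int × Int × Int) (row : List String) : Int × Int × Int × Int :=
  let g := (PySem.List.pyGet? row (gi : Int)).map PySem.Str.lower
  if g = some "male" then
    (st.1 + 1, st.2.1,
     st.2.2.1 + (if PySem.List.pyGet? row (si : Int) = some "1" then 1 else 0), st.2.2.2)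
  else if g = some "female" then
    (st.1, st.2.1 + 1, st.2.2.1,
     st.2.2.2 + (if PySem.List.pyGet? row (si : Int) = some "1" then 1 else 0))
  else st

def count_gender_and_survival (data : List (List String)) (header : List String) : Int × Int × Int × Int :=
  match PySem.List.index? header "Sex", PySem.List.index? header "Survived" with
  | some gi, some si => data.foldl (cgsStep gi si) (0, 0, 0, 0)
  | _, _ => (0, 0, 0, 0)   -- Python raises ValueError here; excluded by Pre_

-- ===== PORT B =====
def isSex (gi : Nat) (s : String) (row : List String) : Bool :=
  (PySem.List.pyGet? row (gi : Int)).map PySem.Str.lower == some s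

def survived1 (si : Nat) (row : List String) : Bool :=
  PySem.List.pyGet? row (si : Int) == some "1"

def count_gender_and_survival_alt (data : List (List String)) (header : List String) : Int × Int × Int × Int :=
  -- header.index raises ValueError when the column is absent; excluded by Pre_
  ((PySem.List.index? header "Sex").bind fun gi =>
   (PySem.List.index? header "Survived").map fun si =>
      ((data.countP (isSex gi "male") : Int),
       (data.countP (isSex gi "female") : Int),
       (data.countP (fun r => isSex gi "male" r && survived1 si r) : Int),
       (data.countP (fun r => isSex gi "female" r && survived1 si r) : Int))).getD (0, 0, 0, 0)

-- ===== PRECONDITION & SPEC =====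
-- Pre_: 'Sex' and 'Survived' occur in the header, every row reaches the Sex column, and any
-- row classified male/female also reaches the Survived column (otherwise Python A raises).
def Pre_count_gender_and_survival (data : List (List String)) (header : List String) : Prop :=
  "Sex" ∈ header ∧ "Survived" ∈ header ∧
  (∀ row ∈ data,
      (PySem.List.index? header "Sex").getD 0 < row.length ∧
      ((PySem.Str.lower (row.getD ((PySem.List.index? header "Sex").getD 0) "") = "male" ∨
        PySem.Str.lower (row.getD ((PySem.List.index? header "Sex").getD 0) "") = "female")
        → (PySem.List.index? header "Survived").getD 0 < row.length))
instance (data : List (List String)) (header : List String) : Decidable (Pre_count_gender_and_survival data header) := by unfold Pre_count_gender_and_survival; infer_instance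

def pvWitness_count_gender_and_survival : List (List String) × List String :=
  ([["male", "1"], ["Female", "0"], ["x", "1"]], ["Sex", "Survived"])

def Spec_count_gender_and_survival (data : List (List String)) (header : List String) (out : Int × Int × Int × Int) : Prop := out = count_gender_and_survival_alt data header
instance (data : List (List String)) (header : List String) (out : Int × Int × Int × Int) : Decidable (Spec_count_gender_and_survival data header out) := by unfold Spec_count_gender_and_survival; infer_instance

-- ===== CLAIM (what is proved, stated in full; the proofs are below) =====
def Claim_equal_count_gender_and_survival : Prop := ∀ (data : List (List String)) (header : List String), Dom_count_gender_and_survival data header → Pre_count_gender_and_survival data header → Spec_count_gender_and_survival data header (count_gender_and_survival data header)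

-- ===== LEMMAS AND PROOFS =====

lemma cgsStep_eq (gi si : Nat) (st : Int × Int × Int × Int) (r : List String) :
    cgsStep gi si st r =
      (st.1 + (if isSex gi "male" r then 1 else 0),
       st.2.1 + (if isSex gi "female" r then 1 else 0),
       st.2.2.1 + (if isSex gi "male" r && survived1 si r then 1 else 0),
       st.2.2.2 + (if isSex gi "female" r && survived1 si r then 1 else 0)) := by
  cases hget : PySem.List.pyGet? r (gi : Int) with
  | none => simp [cgsStep, isSex, survived1, hget]
  | some v =>
      by_cases h1 : PySem.Str.lower v = "male" <;>
      by_cases h2 : PySem.Str.lower v = "female" <;>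
      by_cases h3 : PySem.List.pyGet? r (si : Int) = some "1" <;>
      first
        | (exact absurd (h1 ▸ h2) (by decide))
        | simp [cgsStep, isSex, survived1, hget, h1, h2, h3]

lemma cgs_fold_counts (gi si : Nat) (l : List (List String)) (a b c d : Int) :
    l.foldl (cgsStep gi si) (a, b, c, d) =
      (a + (l.countP (isSex gi "male") : Int),
       b + (l.countP (isSex gi "female") : Int),
       c + (l.countP (fun r => isSex gi "male" r && survived1 si r) : Int),
       d + (l.countP (fun r => isSex gi "female" r && survived1 si r) : Int)) := by
  induction l generalizing a b c d with
  | nil => simp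
  | cons r t ih =>
      rw [List.foldl_cons, cgsStep_eq, ih]
      simp only [List.countP_cons, Prod.mk.injEq]
      refine ⟨?_, ?_, ?_, ?_⟩ <;> split_ifs <;> push_cast <;> ring

-- ===== VERDICT (by name: the statement is the Claim_ definition above) =====
theorem count_gender_and_survival_spec : Claim_equal_count_gender_and_survival := by
  intro data header _ _
  unfold Spec_count_gender_and_survival count_gender_and_survival count_gender_and_survival_alt
  cases hg : PySem.List.index? header "Sex" with
  | none => rfl
  | some gi =>
      cases hs : PySem.List.index? header "Survived" with
      | none => rfl
      | some si => simp [Option.bind, cgs_fold_counts]
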